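-- pv_equiv track=rewrite | github.com/Marek55S/asd | offline_23_24_g/zad4/zad4.py | fedge2
-- ===== SOURCE A (Python) =====
-- def find_edge(edges, vstart, left, right):
--     if left <= right:
--         mid = (left + right) // 2
--         first, sec, trash = edges[mid]
--         first = min(first, sec)
--         if first == vstart - 1:
--             return mid
--         elif first > vstart - 1:
--             return find_edge(edges, vstart, left, mid - 1)
--         else:
--             return find_edge(edges, vstart, mid + 1, right)
--     else:
--         mid = (0 + len(edges)) // 2
--         first, sec, trash = edges[mid]
--         if first > vstart - 1:
--             return 0
--         else:
--             return mid + 1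
--
-- def fedge2(edges, vstart, vend):
--     if vstart <= 1:
--         prev = 0
--     else:
--         prev = find_edge(edges, vstart, 0, len(edges))
--         if prev == -1:
--             prev = 0
--     for i in range(prev, len(edges)):
--         edg = edges[i]
--         v, u, trash = edg
--         if max(u, v) == vend and min(u, v) == vstart:
--             return i
-- ===== SOURCE B (Python) =====
-- def fedge2(edges, vstart, vend):
--     n = len(edges)
--     if vstart <= 1:
--         prev = 0
--     else:
--         prev = None
--         left, right = 0, n
--         while left <= right:
--             mid = (left + right) // 2
--             a, b, _ = edges[mid]
--             if min(a, b) == vstart - 1: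
--                 prev = mid
--                 break
--             if min(a, b) > vstart - 1:
--                 right = mid - 1
--             else:
--                 left = mid + 1
--         if prev is None:
--             mid = n // 2
--             prev = 0 if edges[mid][0] > vstart - 1 else mid + 1
--     for i, (a, b, _) in enumerate(edges[prev:], start=prev):
--         if max(a, b) == vend and min(a, b) == vstart:
--             return i
--     return None
-- ===== Notes on version B (the rewrite author's own statement) =====
-- stated objective: simpler
-- what changed: The recursive find_edge helper is inlined as an iterative left/right binary-search loop with a break sentinel inside fedge2, and the final linear scan is written as enumerate over a slice instead of indexing range(prev, len); same search logic, single self-contained function.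
import Mathlib
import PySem

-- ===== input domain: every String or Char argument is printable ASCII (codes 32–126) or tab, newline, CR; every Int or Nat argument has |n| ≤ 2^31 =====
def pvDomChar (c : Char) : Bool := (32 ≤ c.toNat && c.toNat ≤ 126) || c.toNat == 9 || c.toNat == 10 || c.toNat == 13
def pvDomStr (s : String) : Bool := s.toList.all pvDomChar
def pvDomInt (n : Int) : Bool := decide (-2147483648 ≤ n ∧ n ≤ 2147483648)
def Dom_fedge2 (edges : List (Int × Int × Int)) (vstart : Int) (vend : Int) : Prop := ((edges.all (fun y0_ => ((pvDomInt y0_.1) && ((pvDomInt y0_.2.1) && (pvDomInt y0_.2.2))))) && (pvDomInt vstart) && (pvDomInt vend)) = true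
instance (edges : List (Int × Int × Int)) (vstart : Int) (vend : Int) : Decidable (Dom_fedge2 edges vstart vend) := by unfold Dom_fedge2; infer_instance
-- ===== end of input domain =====

-- B inlines the recursive binary search as an iterative loop and scans via enumerate over a
-- slice; same logic, simpler single-function shape. Equivalence is about return values.

-- ===== PORT A =====
-- find_edge: recursion on the shrinking interval [left, right]; edges[mid] out of range → none (IndexError).
def findEdgeA (edges : List (Int × Int × Int)) (vstart : Int) (left : Int) (right : Int) : Option Int :=
  if h : left ≤ right then
    let mid := PySem.Int.floordiv (left + right) 2
    match PySem.List.pyGet? edges mid with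
    | none => none
    | some (first, sec, _) =>
      let first' := min first sec
      if first' = vstart - 1 then some mid
      else if first' > vstart - 1 then findEdgeA edges vstart left (mid - 1)
      else findEdgeA edges vstart (mid + 1) right
  else
    let mid := PySem.Int.floordiv (0 + (edges.length : Int)) 2
    match PySem.List.pyGet? edges mid with
    | none => none
    | some (first, _, _) => if first > vstart - 1 then some 0 else some (mid + 1)
termination_by (right - left + 2).toNat
decreasing_by
  · have hb := PySem.Int.floordiv_two_mid_bounds h
    omega
  · have hb := PySem.Int.floordiv_two_mid_bounds h
    omega

-- for i in range(prev, len(edges)): first i whose edge matches (vstart, vend)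
def scanA (edges : List (Int × Int × Int)) (vstart : Int) (vend : Int) (prev : Int) : Option Int :=
  (PySem.List.pyRange prev (edges.length : Int) 1).findSome? (fun i =>
    match PySem.List.pyGetD edges i (0, 0, 0) with
    | (v, u, _) => if max u v = vend ∧ min u v = vstart then some i else none)

def fedge2 (edges : List (Int × Int × Int)) (vstart : Int) (vend : Int) : Option Int :=
  if vstart ≤ 1 then scanA edges vstart vend 0
  else
    match findEdgeA edges vstart 0 (edges.length : Int) with
    | none => none
    | some prev0 =>
      let prev := if prev0 = -1 then 0 else prev0
      scanA edges vstart vend prev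

-- ===== PORT B =====
-- while left <= right loop; some (some m) = break with prev = m, some none = normal exit (prev still None),
-- none = IndexError at edges[mid].
def loopB (edges : List (Int × Int × Int)) (vstart : Int) (left : Int) (right : Int) : Option (Option Int) :=
  if h : left ≤ right then
    let mid := PySem.Int.floordiv (left + right) 2
    match PySem.List.pyGet? edges mid with
    | none => none
    | some (a, b, _) =>
      if min a b = vstart - 1 then some (some mid)
      else if min a b > vstart - 1 then loopB edges vstart left (mid - 1)
      else loopB edges vstart (mid + 1) right
  else some none
termination_by (right - left + 2).toNat
decreasing_by
  · have hb := PySem.Int.floordiv_two_mid_bounds h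
    omega
  · have hb := PySem.Int.floordiv_two_mid_bounds h
    omega

-- for i, (a, b, _) in enumerate(edges[prev:], start=prev): …
def scanB (edges : List (Int × Int × Int)) (vstart : Int) (vend : Int) (prev : Int) : Option Int :=
  (PySem.List.enumerate (PySem.List.slice edges (some prev) none) prev).findSome? (fun p =>
    if max p.2.1 p.2.2.1 = vend ∧ min p.2.1 p.2.2.1 = vstart then some p.1 else none)

def fedge2_alt (edges : List (Int × Int × Int)) (vstart : Int) (vend : Int) : Option Int :=
  let n : Int := (edges.length : Int)
  if vstart ≤ 1 then scanB edges vstart vend 0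
  else
    match loopB edges vstart 0 n with
    | none => none
    | some (some prev) => scanB edges vstart vend prev
    | some none =>
      let mid := PySem.Int.floordiv n 2
      match PySem.List.pyGet? edges mid with
      | none => none
      | some (a, _, _) => scanB edges vstart vend (if a > vstart - 1 then 0 else mid + 1)

-- ===== PRECONDITION & SPEC =====
-- Pre_ excludes EXACTLY the inputs on which Python A raises IndexError (B raises there too):
-- vstart > 1 and every probe on the rightmost binary-search path — the indices
-- n - (n+1)/2^(k+1), k = 0, 1, …, for as long as (n+1)/2^(k+1) ≥ 1, where n = len(edges) —
-- has its smaller endpoint below vstart - 1 (vacuously so when edges is empty), so the search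
-- walks off the right end of the list.
def Pre_fedge2 (edges : List (Int × Int × Int)) (vstart : Int) (vend : Int) : Prop :=
  vstart ≤ 1 ∨ ∃ k ∈ List.range edges.length,
    0 < (edges.length + 1) / 2 ^ (k + 1) ∧
    vstart - 1 ≤
      min (edges.getD (edges.length - (edges.length + 1) / 2 ^ (k + 1)) (0, 0, 0)).1
          (edges.getD (edges.length - (edges.length + 1) / 2 ^ (k + 1)) (0, 0, 0)).2.1
instance (edges : List (Int × Int × Int)) (vstart : Int) (vend : Int) : Decidable (Pre_fedge2 edges vstart vend) := by unfold Pre_fedge2; infer_instance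

def pvWitness_fedge2 : (List (Int × Int × Int)) × Int × Int := ([(1, 2, 0), (2, 3, 0)], 2, 3)

def Spec_fedge2 (edges : List (Int × Int × Int)) (vstart : Int) (vend : Int) (out : Option Int) : Prop := out = fedge2_alt edges vstart vend
instance (edges : List (Int × Int × Int)) (vstart : Int) (vend : Int) (out : Option Int) : Decidable (Spec_fedge2 edges vstart vend out) := by unfold Spec_fedge2; infer_instance

-- ===== CLAIM (what is proved, stated in full; the proofs are below) =====
def Claim_equal_fedge2 : Prop := ∀ (edges : List (Int × Int × Int)) (vstart : Int) (vend : Int), Dom_fedge2 edges vstart vend → Pre_fedge2 edges vstart vend → Spec_fedge2 edges vstart vend (fedge2 edges vstart vend)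

-- ===== LEMMAS AND PROOFS =====

-- A's fallback branch, as the value it hands back to fedge2's scan.
def fallbackA (edges : List (Int × Int × Int)) (vstart : Int) : Option Int :=
  match PySem.List.pyGet? edges (PySem.Int.floordiv (0 + (edges.length : Int)) 2) with
  | none => none
  | some (first, _, _) =>
    if first > vstart - 1 then some 0
    else some (PySem.Int.floordiv (0 + (edges.length : Int)) 2 + 1)

lemma findEdgeA_eq_loopB (edges : List (Int × Int × Int)) (vstart left right : Int) :
    findEdgeA edges vstart left right =
      match loopB edges vstart left right with
      | none => none
      | some (some m) => some m
      | some none => fallbackA edges vstart := by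
  fun_induction findEdgeA edges vstart left right with
  | case1 l r h mid hx =>
    rw [loopB, dif_pos h]
    simp only []
    rw [show PySem.List.pyGet? edges (PySem.Int.floordiv (l + r) 2) = none from hx]
  | case2 l r h mid f s t hx fp heq =>
    rw [loopB, dif_pos h]
    simp only []
    rw [show PySem.List.pyGet? edges (PySem.Int.floordiv (l + r) 2) = some (f, s, t) from hx]
    simp only [show (min f s = vstart - 1) = True from eq_true (show min f s = vstart - 1 from heq), if_true]
    rfl
  | case3 l r h mid f s t hx fp heq hgt ih =>
    rw [loopB, dif_pos h]
    simp only []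
    rw [show PySem.List.pyGet? edges (PySem.Int.floordiv (l + r) 2) = some (f, s, t) from hx]
    simp only [show (min f s = vstart - 1) = False from eq_false (show ¬ min f s = vstart - 1 from heq), if_false,
      show (min f s > vstart - 1) = True from eq_true (show min f s > vstart - 1 from hgt), if_true]
    exact ih
  | case4 l r h mid f s t hx fp heq hgt ih =>
    rw [loopB, dif_pos h]
    simp only []
    rw [show PySem.List.pyGet? edges (PySem.Int.floordiv (l + r) 2) = some (f, s, t) from hx]
    simp only [show (min f s = vstart - 1) = False from eq_false (show ¬ min f s = vstart - 1 from heq), if_false,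
      show (min f s > vstart - 1) = False from eq_false (show ¬ min f s > vstart - 1 from hgt), if_false]
    exact ih
  | case5 l r h mid hx =>
    rw [loopB, dif_neg h]
    simp only []
    unfold fallbackA
    rw [show PySem.List.pyGet? edges (PySem.Int.floordiv (0 + (edges.length : Int)) 2) = none from hx]
  | case6 l r h mid f s t hx hgt =>
    rw [loopB, dif_neg h]
    simp only []
    unfold fallbackA
    rw [show PySem.List.pyGet? edges (PySem.Int.floordiv (0 + (edges.length : Int)) 2) = some (f, s, t) from hx]
    simp only [show (f > vstart - 1) = True from eq_true hgt, if_true]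
  | case7 l r h mid f s t hx hgt =>
    rw [loopB, dif_neg h]
    simp only []
    unfold fallbackA
    rw [show PySem.List.pyGet? edges (PySem.Int.floordiv (0 + (edges.length : Int)) 2) = some (f, s, t) from hx]
    simp only [show (f > vstart - 1) = False from eq_false hgt, if_false]
    rfl

lemma loopB_break_nonneg (edges : List (Int × Int × Int)) (vstart : Int) :
    ∀ left right m, 0 ≤ left → loopB edges vstart left right = some (some m) → 0 ≤ m := by
  intro left right
  fun_induction loopB edges vstart left right with
  | case1 l r h mid hx => intro m hl hm; simp at hm
  | case2 l r h mid a b t hx heq =>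
    intro m hl hm
    have hb := PySem.Int.floordiv_two_mid_bounds h
    simp only [Option.some.injEq] at hm
    omega
  | case3 l r h mid a b t hx heq hgt ih => intro m hl hm; exact ih m hl hm
  | case4 l r h mid a b t hx heq hgt ih =>
    intro m hl hm
    have hb := PySem.Int.floordiv_two_mid_bounds h
    exact ih m (by omega) hm
  | case5 l r h => intro m hl hm; simp at hm

lemma scanA_eq_scanB (edges : List (Int × Int × Int)) (vstart vend : Int) :
    ∀ prev, 0 ≤ prev → scanA edges vstart vend prev = scanB edges vstart vend prev := by
  have key : ∀ (n k : Nat) (p : Int), 0 ≤ p → p.toNat = k → edges.length - k ≤ n →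
      (PySem.List.pyRange p (edges.length : Int) 1).findSome? (fun i =>
        match PySem.List.pyGetD edges i (0, 0, 0) with
        | (v, u, _) => if max u v = vend ∧ min u v = vstart then some i else none) =
      (PySem.List.enumerate (edges.drop k) p).findSome? (fun q =>
        if max q.2.1 q.2.2.1 = vend ∧ min q.2.1 q.2.2.1 = vstart then some q.1 else none) := by
    intro n
    induction n with
    | zero =>
      intro k p hp hpk hn
      rw [PySem.List.pyRange_one_eq_nil (by omega), List.drop_eq_nil_of_le (by omega),
        PySem.List.enumerate_nil]
      rfl
    | succ n ihn =>
      intro k p hp hpk hn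
      subst hpk
      by_cases hlt : p.toNat < edges.length
      · have hplt : p < (edges.length : Int) := by omega
        rw [PySem.List.pyRange_one_cons hplt, List.drop_eq_getElem_cons hlt,
          PySem.List.enumerate_cons]
        simp only [List.findSome?_cons]
        rw [PySem.List.pyGetD_eq_getElem edges (i := p) ((0 : Int), (0 : Int), (0 : Int)) hp hplt]
        rcases hc : edges[p.toNat] with ⟨ev, eu, et⟩
        simp only []
        rw [max_comm eu ev, min_comm eu ev]
        by_cases hm : max ev eu = vend ∧ min ev eu = vstart
        · rw [if_pos hm]
        · rw [if_neg hm]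
          simp only []
          exact ihn (p.toNat + 1) (p + 1) (by omega) (by omega) (by omega)
      · rw [PySem.List.pyRange_one_eq_nil (by omega), List.drop_eq_nil_of_le (by omega),
          PySem.List.enumerate_nil]
        rfl
  intro prev hprev
  unfold scanA scanB
  rw [PySem.List.slice_from edges hprev]
  exact key edges.length prev.toNat prev hprev rfl (by omega)

lemma nonneg_half (n : Int) (hn : 0 ≤ n) : 0 ≤ PySem.Int.floordiv n 2 := by
  rw [PySem.Int.floordiv_eq_ediv_of_pos (by omega)]
  exact Int.ediv_nonneg hn (by omega)

-- ===== VERDICT (by name: the statement is the Claim_ definition above) =====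
theorem fedge2_spec : Claim_equal_fedge2 := by
  intro edges vstart vend _hdom _hpre
  unfold Spec_fedge2 fedge2 fedge2_alt
  by_cases hv : vstart ≤ 1
  · simp only [if_pos hv]
    exact scanA_eq_scanB edges vstart vend 0 le_rfl
  · simp only [if_neg hv]
    rw [findEdgeA_eq_loopB]
    rcases hl : loopB edges vstart 0 (edges.length : Int) with _ | mo
    · rfl
    · rcases mo with _ | m
      · -- normal exit: A's fallback value feeds the scan on both sides
        show (match fallbackA edges vstart with
              | none => none
              | some prev0 => scanA edges vstart vend (if prev0 = -1 then 0 else prev0)) = _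
        unfold fallbackA
        have h02 : PySem.Int.floordiv (0 + (edges.length : Int)) 2
            = PySem.Int.floordiv ((edges.length : Int)) 2 := by rw [zero_add]
        rw [h02]
        rcases hg : PySem.List.pyGet? edges (PySem.Int.floordiv ((edges.length : Int)) 2) with _ | x
        · rfl
        · rcases x with ⟨a, b, t⟩
          have hhalf : (0:Int) ≤ PySem.Int.floordiv ((edges.length : Int)) 2 :=
            nonneg_half _ (by exact_mod_cast Nat.zero_le _)
          show (match (if a > vstart - 1 then some 0
                       else some (PySem.Int.floordiv ((edges.length : Int)) 2 + 1) : Option Int) with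
                | none => none
                | some prev0 => scanA edges vstart vend (if prev0 = -1 then 0 else prev0)) =
               scanB edges vstart vend
                 (if a > vstart - 1 then 0 else PySem.Int.floordiv ((edges.length : Int)) 2 + 1)
          by_cases ha : a > vstart - 1
          · rw [if_pos ha, if_pos ha]
            show scanA edges vstart vend (if (0:Int) = -1 then 0 else 0) = _
            rw [if_neg (show ¬ (0:Int) = -1 by omega)]
            exact scanA_eq_scanB edges vstart vend 0 le_rfl
          · rw [if_neg ha, if_neg ha]
            show scanA edges vstart vend
              (if PySem.Int.floordiv ((edges.length : Int)) 2 + 1 = -1 then 0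
               else PySem.Int.floordiv ((edges.length : Int)) 2 + 1) = _
            rw [if_neg (show ¬ PySem.Int.floordiv ((edges.length : Int)) 2 + 1 = -1 by omega)]
            exact scanA_eq_scanB edges vstart vend _ (by omega)
      · -- break with prev = m ≥ 0
        have hm : 0 ≤ m := loopB_break_nonneg edges vstart 0 (edges.length : Int) m le_rfl hl
        show scanA edges vstart vend (if m = -1 then 0 else m) = scanB edges vstart vend m
        rw [if_neg (show ¬ m = -1 by omega)]
        exact scanA_eq_scanB edges vstart vend m hm
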